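-- pv_equiv track=rewrite | github.com/ItsYoshitha/custom-stream-block-cipher-python | stream_cipher.py | encrypt_or_decrypt
-- ===== SOURCE A (Python) =====
-- def lcg_keystream(seed):
--     """Generate keystream bytes using LCG"""
--     a = 1103515245
--     c = 12345
--     m = 1 << 31  # 2^31
--     state = seed
--
--     while True:
--         state = (a * state + c) % m
--         # Use higher bits for better randomness
--         yield (state >> 16) & 0xFF
--
-- def encrypt_or_decrypt(text, key):
--     """XOR text with keystream - same for encrypt and decrypt"""
--     stream = lcg_keystream(key)
--     result = ""
--     for char in text:
--         keystream_byte = next(stream)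
--         cipher_byte = ord(char) ^ keystream_byte
--         result += chr(cipher_byte)
--     return result
-- ===== SOURCE B (Python) =====
-- def _affine_pow(k):
--     """Coefficients (A, C) with f**k(x) = (A*x + C) % m for f(x) = (1103515245*x + 12345) % 2**31,
--     computed by binary exponentiation of the affine map (no threaded LCG state)."""
--     m = 1 << 31
--     A, C = 1, 0
--     Ba, Bc = 1103515245, 12345
--     while k:
--         if k & 1:
--             A, C = (A * Ba) % m, (A * Bc + C) % m
--         Ba, Bc = (Ba * Ba) % m, (Ba * Bc + Bc) % m
--         k >>= 1
--     return A, C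
--
-- def encrypt_or_decrypt(text, key):
--     """XOR text with keystream - same for encrypt and decrypt"""
--     m = 1 << 31
--     out = []
--     for i, ch in enumerate(text):
--         A, C = _affine_pow(i + 1)
--         byte = (((A * key + C) % m) >> 16) & 0xFF
--         out.append(chr(ord(ch) ^ byte))
--     return ''.join(out)
-- ===== Notes on version B (the rewrite author's own statement) =====
-- stated objective: alternative
-- what changed: Replaced the threaded-state LCG generator by a stateless random-access keystream: for each position i the i+1-st LCG state is computed directly by binary exponentiation of the affine map x -> (a*x+c) mod 2^31, so no LCG state is carried between characters.
import Mathlib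
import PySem

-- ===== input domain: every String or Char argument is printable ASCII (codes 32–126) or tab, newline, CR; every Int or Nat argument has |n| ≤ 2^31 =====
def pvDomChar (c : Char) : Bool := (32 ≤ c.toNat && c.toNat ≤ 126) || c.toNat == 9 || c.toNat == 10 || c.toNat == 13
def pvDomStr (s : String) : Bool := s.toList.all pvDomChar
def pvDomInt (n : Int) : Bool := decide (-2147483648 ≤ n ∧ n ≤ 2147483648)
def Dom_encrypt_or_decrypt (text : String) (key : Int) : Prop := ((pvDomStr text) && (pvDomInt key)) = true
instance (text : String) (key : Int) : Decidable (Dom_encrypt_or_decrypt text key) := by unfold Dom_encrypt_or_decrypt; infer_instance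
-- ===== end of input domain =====

-- B replaces A's threaded-state LCG generator by a stateless random-access keystream: each byte is
-- obtained by binary exponentiation of the affine map x ↦ (a*x+c) mod 2^31; return value proved equal.

-- ===== PORT A =====
-- A's single loop: thread the LCG state and append one ciphered char per input char.
def pvEncAuxA : List Char → Int → List Char → List Char
  | [], _, res => res
  | c :: rest, state, res =>
      let state' := PySem.Int.mod (1103515245 * state + 12345) (2 ^ 31)
      let kb := PySem.Int.band (state' >>> 16) 0xFF
      pvEncAuxA rest state' (res ++ [Char.ofNat (PySem.Int.bxor (c.toNat : Int) kb).toNat])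

def encrypt_or_decrypt (text : String) (key : Int) : String :=
  String.mk (pvEncAuxA text.toList key [])

-- ===== PORT B =====
-- Source B's _affine_pow: binary exponentiation of the affine map; returns (A, C) with f^k(x) = (A*x + C) % 2^31.
def pvAffinePow (k : Nat) (A C Ba Bc : Int) : Int × Int :=
  if hk : k = 0 then (A, C)
  else
    let A' := if k % 2 = 1 then PySem.Int.mod (A * Ba) (2 ^ 31) else A
    let C' := if k % 2 = 1 then PySem.Int.mod (A * Bc + C) (2 ^ 31) else C
    pvAffinePow (k / 2) A' C' (PySem.Int.mod (Ba * Ba) (2 ^ 31)) (PySem.Int.mod (Ba * Bc + Bc) (2 ^ 31))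
  termination_by k
  decreasing_by exact Nat.div_lt_self (Nat.pos_of_ne_zero hk) (by norm_num)

-- Source B's loop over enumerate(text): each character XORed with an independently computed keystream byte.
def encrypt_or_decrypt_alt (text : String) (key : Int) : String :=
  String.mk ((PySem.List.enumerate text.toList).map (fun p =>
    let AC := pvAffinePow (p.1 + 1).toNat 1 0 1103515245 12345
    let s := PySem.Int.mod (AC.1 * key + AC.2) (2 ^ 31)
    Char.ofNat (PySem.Int.bxor (p.2.toNat : Int) (PySem.Int.band (s >>> 16) 0xFF)).toNat))

-- ===== PRECONDITION & SPEC =====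
def Spec_encrypt_or_decrypt (text : String) (key : Int) (out : String) : Prop := out = encrypt_or_decrypt_alt text key
instance (text : String) (key : Int) (out : String) : Decidable (Spec_encrypt_or_decrypt text key out) := by unfold Spec_encrypt_or_decrypt; infer_instance

-- ===== CLAIM (what is proved, stated in full; the proofs are below) =====
def Claim_equal_encrypt_or_decrypt : Prop := ∀ (text : String) (key : Int), Dom_encrypt_or_decrypt text key → Spec_encrypt_or_decrypt text key (encrypt_or_decrypt text key)

-- ===== LEMMAS AND PROOFS =====

-- Python '%' with the positive modulus 2^31 is Lean's '%' on Int.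
theorem pvMod31 (x : Int) : PySem.Int.mod x (2 ^ 31) = x % 2147483648 := by
  rw [PySem.Int.mod_eq_emod_of_pos (by norm_num : (0:Int) < 2 ^ 31)]; norm_num

-- one LCG step
def pvStep (y : Int) : Int := (1103515245 * y + 12345) % 2147483648

theorem pvEmodSelf (a : Int) : a % 2147483648 ≡ a [ZMOD 2147483648] :=
  Int.emod_emod_of_dvd a dvd_rfl

-- modular identity used both for the odd bit and for squaring the base
theorem pvFold (A C Ba Bc y : Int) :
    ((A * Ba) % 2147483648 * y + (A * Bc + C) % 2147483648) % 2147483648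
      = (A * ((Ba * y + Bc) % 2147483648) + C) % 2147483648 := by
  have h : (A * Ba) % 2147483648 * y + (A * Bc + C) % 2147483648
      ≡ A * ((Ba * y + Bc) % 2147483648) + C [ZMOD 2147483648] := by
    calc (A * Ba) % 2147483648 * y + (A * Bc + C) % 2147483648
        ≡ A * Ba * y + (A * Bc + C) [ZMOD 2147483648] :=
          Int.ModEq.add ((pvEmodSelf (A * Ba)).mul_right y) (pvEmodSelf (A * Bc + C))
      _ = A * (Ba * y + Bc) + C := by ring
      _ ≡ A * ((Ba * y + Bc) % 2147483648) + C [ZMOD 2147483648] :=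
          Int.ModEq.add_right C (Int.ModEq.mul_left A (pvEmodSelf (Ba * y + Bc)).symm)
  exact h

-- the squared-coefficient map is the base map iterated twice
theorem pvSq (Ba Bc y : Int) :
    ((Ba * Ba) % 2147483648 * y + (Ba * Bc + Bc) % 2147483648) % 2147483648
      = (fun z => (Ba * z + Bc) % 2147483648) ((fun z => (Ba * z + Bc) % 2147483648) y) :=
  pvFold Ba Bc Ba Bc y

-- loop invariant of pvAffinePow: the result evaluates as acc ∘ base^[k] (mod 2^31)
theorem pvAffinePow_eval (k : Nat) : ∀ (A C Ba Bc x : Int),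
    ((pvAffinePow k A C Ba Bc).1 * x + (pvAffinePow k A C Ba Bc).2) % 2147483648
      = (A * ((fun y => (Ba * y + Bc) % 2147483648)^[k] x) + C) % 2147483648 := by
  induction k using Nat.strong_induction_on with
  | _ k ih =>
    intro A C Ba Bc x
    by_cases hk : k = 0
    · subst hk; simp [pvAffinePow]
    · have hdiv : k / 2 < k := Nat.div_lt_self (Nat.pos_of_ne_zero hk) (by norm_num)
      have htwo : (fun y => (Ba * y + Bc) % 2147483648)^[2]
          = (fun y => (Ba * y + Bc) % 2147483648) ∘ (fun y => (Ba * y + Bc) % 2147483648) := by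
        funext y
        rw [Function.iterate_succ_apply', Function.iterate_one]
        rfl
      have hiter : (fun y => ((Ba * Ba) % 2147483648 * y + (Ba * Bc + Bc) % 2147483648) % 2147483648)^[k / 2] x
          = (fun y => (Ba * y + Bc) % 2147483648)^[2 * (k / 2)] x := by
        have hfn : (fun y => ((Ba * Ba) % 2147483648 * y + (Ba * Bc + Bc) % 2147483648) % 2147483648)
            = (fun y => (Ba * y + Bc) % 2147483648) ∘ (fun y => (Ba * y + Bc) % 2147483648) := by
          funext y; exact pvSq Ba Bc y
        rw [hfn, ← htwo, ← Function.iterate_mul]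
      rw [pvAffinePow, dif_neg hk]
      rcases Nat.even_or_odd k with he | ho
      · have h2 : k % 2 = 0 := Nat.even_iff.mp he
        simp only [pvMod31, h2]
        rw [ih (k / 2) hdiv, hiter]
        have hke : 2 * (k / 2) = k := by omega
        rw [hke]
        norm_num
      · have h2 : k % 2 = 1 := Nat.odd_iff.mp ho
        simp only [pvMod31, h2, reduceIte]
        rw [ih (k / 2) hdiv, hiter, pvFold]

        have hsucc : (Ba * ((fun y => (Ba * y + Bc) % 2147483648)^[2 * (k / 2)] x) + Bc) % 2147483648
            = (fun y => (Ba * y + Bc) % 2147483648)^[2 * (k / 2) + 1] x := by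
          rw [Function.iterate_succ_apply']
        rw [hsucc]
        have hko : 2 * (k / 2) + 1 = k := by omega
        rw [hko]

-- iterates of pvStep are idempotent under % 2^31 (each iterate ≥ 1 already ends in % 2^31)
theorem pvIterMod (key : Int) (n : Nat) :
    (pvStep^[n + 1] key) % 2147483648 = pvStep^[n + 1] key := by
  rw [Function.iterate_succ_apply']
  exact Int.emod_emod_of_dvd _ dvd_rfl

-- B's per-index keystream state equals A's threaded state after n+1 LCG steps
theorem pvByte (key : Int) (n : Nat) :
    PySem.Int.mod ((pvAffinePow (n + 1) 1 0 1103515245 12345).1 * key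
        + (pvAffinePow (n + 1) 1 0 1103515245 12345).2) (2 ^ 31)
      = pvStep^[n + 1] key := by
  rw [pvMod31, pvAffinePow_eval]
  have : (fun y => (1103515245 * y + 12345) % 2147483648) = pvStep := rfl
  rw [this]
  rw [one_mul, add_zero, pvIterMod]

-- A's loop from state pvStep^[j] key produces B's per-index map over enumerate starting at j
theorem pvAuxA_eq (key : Int) (cs : List Char) : ∀ (j : Nat) (res : List Char),
    pvEncAuxA cs (pvStep^[j] key) res
      = res ++ (PySem.List.enumerate cs (j : Int)).map (fun p =>
          let AC := pvAffinePow (p.1 + 1).toNat 1 0 1103515245 12345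
          let s := PySem.Int.mod (AC.1 * key + AC.2) (2 ^ 31)
          Char.ofNat (PySem.Int.bxor (p.2.toNat : Int) (PySem.Int.band (s >>> 16) 0xFF)).toNat) := by
  induction cs with
  | nil => intro j res; simp [pvEncAuxA]
  | cons c rest ih =>
      intro j res
      have hstate : PySem.Int.mod (1103515245 * pvStep^[j] key + 12345) (2 ^ 31)
          = pvStep^[j + 1] key := by
        rw [pvMod31, Function.iterate_succ_apply']; rfl
      have htoNat : ((j : Int) + 1).toNat = j + 1 := by omega
      simp only [pvEncAuxA, hstate, PySem.List.enumerate_cons, List.map_cons, htoNat, pvByte]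
      rw [ih (j + 1)]
      push_cast
      simp

-- ===== VERDICT (by name: the statement is the Claim_ definition above) =====
theorem encrypt_or_decrypt_spec : Claim_equal_encrypt_or_decrypt := by
  intro text key _
  unfold Spec_encrypt_or_decrypt encrypt_or_decrypt encrypt_or_decrypt_alt
  have h0 : key = pvStep^[0] key := rfl
  rw [h0, pvAuxA_eq key text.toList 0 []]
  simp
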